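-- pv_equiv track=rewrite | github.com/jedie/DragonPy | PyDC/PyDC/utils.py | find_iter_window
-- ===== SOURCE A (Python) =====
-- import collections
-- import types
-- from collections.abc import Iterable
--
-- def iter_window(g, window_size):
--     """
--     interate over 'g' bit-by-bit and yield a window with the given 'window_size' width.
--
--     >>> for v in iter_window([1,2,3,4], window_size=2): v
--     [1, 2]
--     [2, 3]
--     [3, 4]
--     >>> for v in iter_window([1,2,3,4,5], window_size=3): v
--     [1, 2, 3]
--     [2, 3, 4]
--     [3, 4, 5]
--
--     >>> for v in iter_window([1,2,3,4], window_size=2):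
--     ...    v
--     ...    v.append(True)
--     [1, 2]
--     [2, 3]
--     [3, 4]
--     """
--     values = collections.deque(maxlen=window_size)
--     for value in g:
--         values.append(value)
--         if len(values) == window_size:
--             yield list(values)
--
-- class MaxPosArraived(Exception):
--     pass
--
-- class PatternNotFound(Exception):
--     pass
--
-- def find_iter_window(bitstream, pattern, max_pos=None):
--     """
--     >>> pattern = list(bytes2bit_strings("B"))
--     >>> bitstream = bytes2bit_strings("AAABCCC")
--     >>> find_iter_window(bitstream, pattern)
--     24
--     >>> "".join(list(bitstream2string(bitstream)))
--     'CCC'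
--
--     >>> find_iter_window(bytes2bit_strings("HELLO!"), list(bytes2bit_strings("LO")))
--     24
--
--     >>> find_iter_window(bytes2bit_strings("HELLO!"), list(bytes2bit_strings("LO")), max_pos=16)
--     Traceback (most recent call last):
--     ...
--     PyDC.PyDC.utils.MaxPosArraived: 17
--
--     >>> find_iter_window(bytes2bit_strings("HELLO!"), list(bytes2bit_strings("X")))
--     Traceback (most recent call last):
--     ...
--     PyDC.PyDC.utils.PatternNotFound: 40
--     """
--     assert isinstance(bitstream, (Iterable, types.GeneratorType))
--     assert isinstance(pattern, (list, tuple))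
--
--     window_size = len(pattern)
--     pos = -1
--     for pos, data in enumerate(iter_window(bitstream, window_size)):
--         #         print pos, data, pattern
--         if data == pattern:
--             return pos
--         if max_pos is not None and pos > max_pos:
--             raise MaxPosArraived(pos)
--     raise PatternNotFound(pos)
-- ===== SOURCE B (Python) =====
-- # Rabin-Karp re-implementation: a rolling window hash, so the full window is
-- # compared element-wise only on a hash hit (a different algorithm, not claimed faster).
-- # Note: B materializes the bitstream into a list (A consumes it lazily).
--
-- class MaxPosArraived(Exception):
--     pass
--
-- class PatternNotFound(Exception):
--     pass
--
-- _M = (1 << 61) - 1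
-- _B = 1000003
--
--
-- def _ehash(s):
--     h = 0
--     for c in s:
--         h = (h * 131 + ord(c) + 1) % _M
--     return h + 1
--
--
-- def find_iter_window(bitstream, pattern, max_pos=None):
--     pattern = list(pattern)
--     bits = list(bitstream)
--     m = len(pattern)
--     n = len(bits)
--     if m == 0:
--         if n == 0:
--             raise PatternNotFound(-1)
--         return 0
--     if n < m:
--         raise PatternNotFound(-1)
--     ph = 0
--     for s in pattern:
--         ph = (ph * _B + _ehash(s)) % _M
--     eh = [_ehash(s) for s in bits]
--     h = 0
--     for e in eh[:m]:
--         h = (h * _B + e) % _M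
--     pw = pow(_B, m - 1, _M)
--     last = n - m
--     p = 0
--     while True:
--         if h == ph and bits[p:p + m] == pattern:
--             return p
--         if max_pos is not None and p > max_pos:
--             raise MaxPosArraived(p)
--         if p == last:
--             raise PatternNotFound(last)
--         h = ((h - eh[p] * pw) * _B + eh[p + m]) % _M
--         p += 1
-- ===== Notes on version B (the rewrite author's own statement) =====
-- stated objective: alternative
-- what changed: Replaces A's generator/deque pipeline (which rebuilds and compares the whole m-element window at every position) by a Rabin-Karp scan: a rolling polynomial hash mod 2^61-1 is updated per position and the window is compared element-wise only on a hash hit; in pure Python this is not measurably faster because A's window comparison runs in C.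
import Mathlib
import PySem

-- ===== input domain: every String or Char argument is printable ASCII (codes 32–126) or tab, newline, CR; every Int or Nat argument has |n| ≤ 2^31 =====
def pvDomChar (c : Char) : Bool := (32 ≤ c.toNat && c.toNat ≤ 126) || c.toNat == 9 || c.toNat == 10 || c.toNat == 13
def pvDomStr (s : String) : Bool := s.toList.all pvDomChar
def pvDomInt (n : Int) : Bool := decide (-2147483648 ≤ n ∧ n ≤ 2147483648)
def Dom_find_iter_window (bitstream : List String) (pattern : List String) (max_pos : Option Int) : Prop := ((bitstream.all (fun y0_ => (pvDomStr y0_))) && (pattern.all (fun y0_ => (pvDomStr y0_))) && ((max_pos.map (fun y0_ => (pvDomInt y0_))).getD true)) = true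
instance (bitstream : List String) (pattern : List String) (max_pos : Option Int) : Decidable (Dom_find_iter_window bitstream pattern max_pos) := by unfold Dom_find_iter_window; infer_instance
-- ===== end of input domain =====

-- B replaces A's deque-window scan by a Rabin-Karp rolling-hash scan (objective:
-- alternative algorithm; not measured faster); equivalence is about the RETURN
-- value only (A consumes its iterator lazily, B materialises the bitstream).

-- ===== PORT A =====
-- A's generator pipeline, transliterated: `dq` is the deque (maxlen = pattern.length),
-- `pos` the enumerate counter (-1 before the first yielded window).  A's raises
-- (PatternNotFound / MaxPosArraived) become the -1 returns; Pre_ excludes them.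
def fiwALoop (pattern : List String) (max_pos : Option Int) :
    List String → List String → Int → Int
  | [], _, _ => -1  -- raise PatternNotFound(pos)
  | x :: rest, dq, pos =>
    let dq' := (dq ++ [x]).drop ((dq.length + 1) - pattern.length)
    if dq'.length = pattern.length then
      if dq' = pattern then pos + 1
      else
        match max_pos with
        | some mp => if pos + 1 > mp then -1  -- raise MaxPosArraived(pos)
                     else fiwALoop pattern max_pos rest dq' (pos + 1)
        | none => fiwALoop pattern max_pos rest dq' (pos + 1)
    else fiwALoop pattern max_pos rest dq' pos

def find_iter_window (bitstream : List String) (pattern : List String) (max_pos : Option Int) : Int :=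
  fiwALoop pattern max_pos bitstream [] (-1)

-- ===== PORT B =====
def pvM : Int := 2305843009213693951
def pvBase : Int := 1000003

def ehash (s : String) : Int :=
  s.toList.foldl (fun h c => PySem.Int.mod (h * 131 + (c.toNat : Int) + 1) pvM) 0 + 1

-- Source B's `while True` scan; the `last ≤ p` guard is Python's `p == last`
-- (p starts at 0 ≤ last and never exceeds last), written with ≤ for totality.
def fiwBLoop (bits pattern : List String) (eh : List Int) (ph pw : Int) (m last : Nat)
    (max_pos : Option Int) (p : Nat) (h : Int) : Int :=
  if h = ph ∧ PySem.List.slice bits (some (p : Int)) (some ((p : Int) + (m : Int))) = pattern then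
    (p : Int)
  else if (match max_pos with | some mp => decide ((p : Int) > mp) | none => false) then
    -1  -- raise MaxPosArraived(p)
  else if _hp : last ≤ p then -1  -- raise PatternNotFound(last)
  else
    fiwBLoop bits pattern eh ph pw m last max_pos (p + 1)
      (PySem.Int.mod ((h - PySem.List.pyGetD eh (p : Int) 0 * pw) * pvBase
          + PySem.List.pyGetD eh ((p : Int) + (m : Int)) 0) pvM)
  termination_by last - p

def find_iter_window_alt (bitstream : List String) (pattern : List String) (max_pos : Option Int) : Int :=
  let m := pattern.length
  let n := bitstream.length
  if m = 0 then (if n = 0 then -1 else 0)  -- raise PatternNotFound(-1) / return 0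
  else if n < m then -1  -- raise PatternNotFound(-1)
  else
    let ph := pattern.foldl (fun h s => PySem.Int.mod (h * pvBase + ehash s) pvM) 0
    let eh := bitstream.map ehash
    let h0 := (eh.take m).foldl (fun h e => PySem.Int.mod (h * pvBase + e) pvM) 0
    let pw := PySem.Int.powMod pvBase (m - 1) pvM  -- pow(_B, m-1, _M)
    fiwBLoop bitstream pattern eh ph pw m (n - m) max_pos 0 h0

-- ===== PRECONDITION & SPEC =====
-- Pre_ excludes exactly the inputs on which Python A raises (PatternNotFound when the
-- pattern occurs nowhere as a window — including an empty pattern on an empty stream —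
-- and MaxPosArraived when every occurrence lies beyond max_pos + 1).
def Pre_find_iter_window (bitstream : List String) (pattern : List String) (max_pos : Option Int) : Prop :=
  (pattern = [] → bitstream ≠ []) ∧
  ∃ p ∈ List.range (bitstream.length + 1),
    (bitstream.drop p).take pattern.length = pattern ∧
    max_pos.all (fun mp => decide (p = 0 ∨ (p : Int) ≤ mp + 1)) = true

instance (bitstream : List String) (pattern : List String) (max_pos : Option Int) :
    Decidable (Pre_find_iter_window bitstream pattern max_pos) := by
  unfold Pre_find_iter_window; infer_instance

def pvWitness_find_iter_window : List String × List String × Option Int :=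
  (["0", "1", "1"], ["1", "1"], some 0)

def Spec_find_iter_window (bitstream : List String) (pattern : List String) (max_pos : Option Int) (out : Int) : Prop := out = find_iter_window_alt bitstream pattern max_pos
instance (bitstream : List String) (pattern : List String) (max_pos : Option Int) (out : Int) : Decidable (Spec_find_iter_window bitstream pattern max_pos out) := by unfold Spec_find_iter_window; infer_instance

-- ===== CLAIM (what is proved, stated in full; the proofs are below) =====
def Claim_equal_find_iter_window : Prop := ∀ (bitstream : List String) (pattern : List String) (max_pos : Option Int), Dom_find_iter_window bitstream pattern max_pos → Pre_find_iter_window bitstream pattern max_pos → Spec_find_iter_window bitstream pattern max_pos (find_iter_window bitstream pattern max_pos)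

-- ===== LEMMAS AND PROOFS =====

-- Reference scan both ports are reduced to: compare the window at p directly, p = 0,1,…
def fiwRef (bits pattern : List String) (last : Nat) (max_pos : Option Int) (p : Nat) : Int :=
  if (bits.drop p).take pattern.length = pattern then (p : Int)
  else if (match max_pos with | some mp => decide ((p : Int) > mp) | none => false) then -1
  else if last ≤ p then -1
  else fiwRef bits pattern last max_pos (p + 1)
  termination_by last - p

theorem fiwRef_end (bits pattern : List String) (last : Nat) (mp : Option Int) (p : Nat)
    (hw : 1 ≤ pattern.length) (hp : last ≤ p) (hlen : bits.length < p + pattern.length) :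
    fiwRef bits pattern last mp p = -1 := by
  rw [fiwRef.eq_def]
  have hne : (bits.drop p).take pattern.length ≠ pattern := by
    intro hcontra
    have := congrArg List.length hcontra
    simp [List.length_take, List.length_drop] at this
    omega
  simp only [if_neg hne]
  split <;> simp [hp]


-- Raw (unreduced) polynomial hash and the modular hash Source B folds up.
def hraw (l : List Int) (a : Int) : Int := l.foldl (fun h e => h * pvBase + e) a
def hmod (l : List Int) : Int := l.foldl (fun h e => PySem.Int.mod (h * pvBase + e) pvM) 0

theorem pvM_pos : (0 : Int) < pvM := by norm_num [pvM]

theorem hmod_from (l : List Int) : ∀ a : Int,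
    l.foldl (fun h e => PySem.Int.mod (h * pvBase + e) pvM) (PySem.Int.mod a pvM)
      = PySem.Int.mod (hraw l a) pvM := by
  induction l with
  | nil => intro a; simp [hraw]
  | cons e l ih =>
    intro a
    have hstep : PySem.Int.mod (PySem.Int.mod a pvM * pvBase + e) pvM
        = PySem.Int.mod (a * pvBase + e) pvM := by
      rw [PySem.Int.mod_eq_emod_of_pos pvM_pos, PySem.Int.mod_eq_emod_of_pos pvM_pos,
        PySem.Int.mod_eq_emod_of_pos pvM_pos]
      have h1 : a % pvM ≡ a [ZMOD pvM] := Int.emod_emod_of_dvd a dvd_rfl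
      exact (h1.mul_right pvBase).add_right e
    simp only [List.foldl_cons, hstep]
    exact ih (a * pvBase + e)

theorem hmod_eq (l : List Int) : hmod l = PySem.Int.mod (hraw l 0) pvM := by
  have h0 : (0 : Int) = PySem.Int.mod 0 pvM := by
    rw [PySem.Int.mod_eq_emod_of_pos pvM_pos]; simp
  calc hmod l = l.foldl (fun h e => PySem.Int.mod (h * pvBase + e) pvM) (PySem.Int.mod 0 pvM) := by
        rw [hmod, ← h0]
    _ = PySem.Int.mod (hraw l 0) pvM := hmod_from l 0

theorem hraw_shift (l : List Int) : ∀ a : Int, hraw l a = a * pvBase ^ l.length + hraw l 0 := by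
  induction l with
  | nil => intro a; simp [hraw]
  | cons e l ih =>
    intro a
    simp only [hraw, List.foldl_cons, List.length_cons] at *
    rw [ih (a * pvBase + e), ih (0 * pvBase + e)]
    ring

theorem hraw_append (l : List Int) (x a : Int) : hraw (l ++ [x]) a = hraw l a * pvBase + x := by
  simp [hraw, List.foldl_append]

theorem roll_mod (X t e0 e1 : Int) (m' : Nat) (hX : X = e0 * pvBase ^ m' + t) :
    PySem.Int.mod ((PySem.Int.mod X pvM - e0 * (pvBase ^ m' % pvM)) * pvBase + e1) pvM
      = PySem.Int.mod (t * pvBase + e1) pvM := by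
  rw [PySem.Int.mod_eq_emod_of_pos pvM_pos, PySem.Int.mod_eq_emod_of_pos pvM_pos,
    PySem.Int.mod_eq_emod_of_pos pvM_pos]
  have h1 : X % pvM ≡ X [ZMOD pvM] := Int.emod_emod_of_dvd X dvd_rfl
  have h2 : pvBase ^ m' % pvM ≡ pvBase ^ m' [ZMOD pvM] := Int.emod_emod_of_dvd _ dvd_rfl
  have h3 := ((h1.sub (h2.mul_left e0)).mul_right pvBase).add_right e1
  have h4 : (X - e0 * pvBase ^ m') * pvBase + e1 = t * pvBase + e1 := by subst hX; ring
  exact h4 ▸ h3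


theorem window_cons (bits : List String) (m' p : Nat) (hp : p < bits.length) :
    (bits.drop p).take (m' + 1) = bits[p] :: ((bits.drop (p + 1)).take m') := by
  rw [List.drop_eq_getElem_cons hp, List.take_succ_cons]

theorem window_snoc (bits : List String) (m' p : Nat) (h2 : p + 1 + (m' + 1) ≤ bits.length) :
    (bits.drop (p + 1)).take (m' + 1) = ((bits.drop (p + 1)).take m') ++ [bits[p + m' + 1]'(by omega)] := by
  rw [List.take_add_one]
  congr 1
  have hm' : m' < (bits.drop (p + 1)).length := by simp [List.length_drop]; omega
  rw [List.getElem?_eq_getElem hm']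
  simp [List.getElem_drop]
  congr 1
  omega

theorem roll_window (bits : List String) (m p : Nat) (hm : 1 ≤ m) (h2 : p + 1 + m ≤ bits.length) :
    PySem.Int.mod ((hmod (((bits.drop p).take m).map ehash)
        - PySem.List.pyGetD (bits.map ehash) (p : Int) 0 * PySem.Int.powMod pvBase (m - 1) pvM) * pvBase
        + PySem.List.pyGetD (bits.map ehash) ((p : Int) + (m : Int)) 0) pvM
      = hmod (((bits.drop (p + 1)).take m).map ehash) := by
  obtain ⟨m', rfl⟩ : ∃ m', m = m' + 1 := ⟨m - 1, by omega⟩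
  have hpn : p < bits.length := by omega
  have hpm : p + m' + 1 < bits.length := by omega
  have g0 : PySem.List.pyGetD (bits.map ehash) (p : Int) 0 = ehash bits[p] := by
    rw [PySem.List.pyGetD_natCast, List.getD_eq_getElem _ _ (by simpa using hpn)]
    simp
  have g1 : PySem.List.pyGetD (bits.map ehash) ((p : Int) + ((m' + 1 : Nat) : Int)) 0
      = ehash (bits[p + m' + 1]'hpm) := by
    have : (p : Int) + ((m' + 1 : Nat) : Int) = ((p + m' + 1 : Nat) : Int) := by push_cast; ring
    rw [this, PySem.List.pyGetD_natCast, List.getD_eq_getElem _ _ (by simpa using hpm)]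
    simp
  have hlen : (((bits.drop (p + 1)).take m').map ehash).length = m' := by
    simp [List.length_take, List.length_drop]; omega
  set t := hraw (((bits.drop (p + 1)).take m').map ehash) 0 with ht
  have hX : hraw ((((bits.drop p).take (m' + 1)).map ehash)) 0
      = ehash bits[p] * pvBase ^ m' + t := by
    rw [window_cons bits m' p hpn]
    simp only [List.map_cons, hraw, List.foldl_cons, zero_mul, zero_add]
    rw [show (List.foldl (fun h e => h * pvBase + e) (ehash bits[p])
        (((bits.drop (p + 1)).take m').map ehash)) = hraw (((bits.drop (p + 1)).take m').map ehash) (ehash bits[p]) from rfl]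
    rw [hraw_shift _ (ehash bits[p]), hlen]
  have hW' : hraw (((bits.drop (p + 1)).take (m' + 1)).map ehash) 0
      = t * pvBase + ehash (bits[p + m' + 1]'hpm) := by
    rw [window_snoc bits m' p h2]
    simp only [List.map_append, List.map_cons, List.map_nil]
    rw [hraw_append]
  rw [g0, g1, hmod_eq, hmod_eq, hX, hW']
  rw [PySem.Int.powMod_eq_emod _ _ pvM_pos]
  have : m' + 1 - 1 = m' := by omega
  rw [this]
  exact roll_mod _ t (ehash bits[p]) (ehash (bits[p + m' + 1]'hpm)) m' rfl

theorem B_eq_ref (bits pattern : List String) (mp : Option Int) (m last : Nat)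
    (hm : m = pattern.length) (hm1 : 1 ≤ m) (hn : m ≤ bits.length)
    (hlast : last = bits.length - m) :
    ∀ k p h, last - p ≤ k → p ≤ last → h = hmod (((bits.drop p).take m).map ehash) →
    fiwBLoop bits pattern (bits.map ehash) (hmod (pattern.map ehash))
        (PySem.Int.powMod pvBase (m - 1) pvM) m last mp p h
      = fiwRef bits pattern last mp p := by
  intro k
  induction k with
  | zero =>
    intro p h hk hp hh
    rw [fiwBLoop.eq_def, fiwRef.eq_def]
    rw [PySem.List.slice_natCast_add bits p m, ← hm]
    by_cases hmatch : (bits.drop p).take m = pattern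
    · rw [if_pos ⟨by rw [hh, hmatch], hmatch⟩, if_pos hmatch]
    · rw [if_neg (fun hc => hmatch hc.2), if_neg hmatch]
      generalize (match mp with | some m' => decide ((p : Int) > m') | none => false) = c
      cases c
      · rw [if_neg (by simp), if_neg (by simp), dif_pos (by omega : last ≤ p),
          if_pos (by omega : last ≤ p)]
      · rw [if_pos rfl, if_pos rfl]
  | succ k ih =>
    intro p h hk hp hh
    rw [fiwBLoop.eq_def, fiwRef.eq_def]
    rw [PySem.List.slice_natCast_add bits p m, ← hm]
    by_cases hmatch : (bits.drop p).take m = pattern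
    · rw [if_pos ⟨by rw [hh, hmatch], hmatch⟩, if_pos hmatch]
    · rw [if_neg (fun hc => hmatch hc.2), if_neg hmatch]
      generalize (match mp with | some m' => decide ((p : Int) > m') | none => false) = c
      cases c
      · rw [if_neg (by simp), if_neg (by simp)]
        by_cases hl : last ≤ p
        · rw [dif_pos hl, if_pos hl]
        · rw [dif_neg hl, if_neg hl]
          refine ih (p + 1) _ (by omega) (by omega) ?_
          rw [hh]
          exact roll_window bits m p hm1 (by omega)
      · rw [if_pos rfl, if_pos rfl]

theorem dq_step (bits : List String) (w i : Nat) (hw : 1 ≤ w) (hi : i < bits.length) :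
    (((bits.take i).drop (i - w)) ++ [bits[i]]).drop ((((bits.take i).drop (i - w)).length + 1) - w)
      = (bits.take (i + 1)).drop (i + 1 - w) := by
  have hlen : ((bits.take i).drop (i - w)).length = i - (i - w) := by
    simp [List.length_drop, List.length_take]; omega
  have htake : bits.take (i + 1) = bits.take i ++ [bits[i]] := by
    rw [List.take_add_one, List.getElem?_eq_getElem hi]
    rfl
  by_cases hcase : i < w
  · have h1 : i - w = 0 := by omega
    have h2 : i - (i - w) + 1 - w = 0 := by omega
    have h3 : i + 1 - w = 0 := by omega
    rw [hlen, h2, h3, h1, htake]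
    simp
  · have h1 : i - (i - w) + 1 - w = 1 := by omega
    rw [hlen, h1, htake]
    rw [List.drop_append_of_le_length
      (by rw [hlen]; omega : 1 ≤ ((bits.take i).drop (i - w)).length)]
    rw [List.drop_append_of_le_length
      (by simp [List.length_take]; omega : i + 1 - w ≤ (bits.take i).length)]
    rw [List.drop_drop]
    congr 2
    omega

theorem A_eq_ref (bits pattern : List String) (mp : Option Int) (w last : Nat)
    (hw : w = pattern.length) (hw1 : 1 ≤ w) (hn : w ≤ bits.length)
    (hlast : last = bits.length - w) :
    ∀ k i pos, i ≤ bits.length → bits.length - i ≤ k →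
    pos = max ((i : Int) - (w : Int)) (-1) →
    fiwALoop pattern mp (bits.drop i) ((bits.take i).drop (i - w)) pos
      = fiwRef bits pattern last mp (i + 1 - w) := by
  intro k
  induction k with
  | zero =>
    intro i pos hi hk hpos
    have hin : i = bits.length := by omega
    subst hin
    rw [List.drop_length, show fiwALoop pattern mp [] ((bits.take bits.length).drop (bits.length - w)) pos = -1 from rfl]
    rw [fiwRef_end bits pattern last mp _ (by omega) (by omega) (by omega)]
  | succ k ih =>
    intro i pos hi hk hpos
    by_cases hin : i = bits.length
    · subst hin
      rw [List.drop_length, show fiwALoop pattern mp [] ((bits.take bits.length).drop (bits.length - w)) pos = -1 from rfl]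
      rw [fiwRef_end bits pattern last mp _ (by omega) (by omega) (by omega)]
    · have hilt : i < bits.length := by omega
      have hilt' : i < bits.length := hilt
      subst hw
      rw [List.drop_eq_getElem_cons hilt]
      have hdq := dq_step bits pattern.length i hw1 hilt
      have hdlen : ((bits.take (i + 1)).drop (i + 1 - pattern.length)).length
          = (i + 1) - (i + 1 - pattern.length) := by
        simp [List.length_drop, List.length_take]; omega
      by_cases hc : pattern.length ≤ i + 1
      · have hcond : ((bits.take (i + 1)).drop (i + 1 - pattern.length)).length = pattern.length := by
          rw [hdlen]; omega
        have hwin : (bits.take (i + 1)).drop (i + 1 - pattern.length)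
            = (bits.drop (i + 1 - pattern.length)).take pattern.length := by
          rw [List.drop_take]; congr 1; omega
        have hpos1 : pos + 1 = ((i + 1 - pattern.length : Nat) : Int) := by rw [hpos]; omega
        have hposm : pos + 1 = max (((i + 1 : Nat) : Int) - (pattern.length : Int)) (-1) := by
          rw [hpos]; push_cast; omega
        have hidx : i + 1 + 1 - pattern.length = (i + 1 - pattern.length) + 1 := by omega
        cases mp with
        | none =>
          rw [fiwALoop.eq_3, hdq, if_pos hcond, fiwRef.eq_def, ← hwin]
          by_cases hmatch : (bits.take (i + 1)).drop (i + 1 - pattern.length) = pattern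
          · rw [if_pos hmatch, if_pos hmatch, hpos1]
          · rw [if_neg hmatch, if_neg hmatch,
              ih (i + 1) (pos + 1) (by omega) (by omega) hposm, hidx,
              if_neg (by simp : ¬ (false = true))]
            by_cases hl : last ≤ i + 1 - pattern.length
            · rw [if_pos hl,
                fiwRef_end bits pattern last none ((i + 1 - pattern.length) + 1)
                  (by omega) (by omega) (by omega)]
            · rw [if_neg hl]
        | some m =>
          rw [fiwALoop.eq_2, hdq, if_pos hcond, fiwRef.eq_def, ← hwin]
          by_cases hmatch : (bits.take (i + 1)).drop (i + 1 - pattern.length) = pattern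
          · rw [if_pos hmatch, if_pos hmatch, hpos1]
          · rw [if_neg hmatch, if_neg hmatch]
            by_cases hgt : ((i + 1 - pattern.length : Nat) : Int) > m
            · rw [if_pos (by rw [hpos1]; exact hgt), if_pos (by simpa using hgt)]
            · rw [if_neg (by rw [hpos1]; exact hgt),
                if_neg (by simpa using hgt),
                ih (i + 1) (pos + 1) (by omega) (by omega) hposm, hidx]
              by_cases hl : last ≤ i + 1 - pattern.length
              · rw [if_pos hl,
                  fiwRef_end bits pattern last (some m) ((i + 1 - pattern.length) + 1)
                    (by omega) (by omega) (by omega)]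
              · rw [if_neg hl]
      · have hcond : ¬ ((bits.take (i + 1)).drop (i + 1 - pattern.length)).length = pattern.length := by
          rw [hdlen]; omega
        have hposm : pos = max (((i + 1 : Nat) : Int) - (pattern.length : Int)) (-1) := by
          rw [hpos]; push_cast; omega
        have hidx : i + 1 + 1 - pattern.length = i + 1 - pattern.length := by omega
        cases mp with
        | none =>
          rw [fiwALoop.eq_3, hdq, if_neg hcond,
            ih (i + 1) pos (by omega) (by omega) hposm, hidx]
        | some m =>
          rw [fiwALoop.eq_2, hdq, if_neg hcond,
            ih (i + 1) pos (by omega) (by omega) hposm, hidx]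


-- ===== VERDICT (by name: the statement is the Claim_ definition above) =====
theorem find_iter_window_spec : Claim_equal_find_iter_window := by
  unfold Claim_equal_find_iter_window Spec_find_iter_window
  intro bs pat mp _hdom hpre
  obtain ⟨hemp, p, hpmem, hslice, _hmax⟩ := hpre
  by_cases hw0 : pat.length = 0
  · have hpat : pat = [] := List.length_eq_zero_iff.mp hw0
    subst hpat
    obtain ⟨x, rest, rfl⟩ := List.exists_cons_of_ne_nil (hemp rfl)
    cases mp with
    | none => simp [find_iter_window, find_iter_window_alt, fiwALoop]
    | some m => simp [find_iter_window, find_iter_window_alt, fiwALoop]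
  · have hw1 : 1 ≤ pat.length := by omega
    have hlen := congrArg List.length hslice
    simp only [List.length_take, List.length_drop] at hlen
    have hn : pat.length ≤ bs.length := by omega
    have hA : find_iter_window bs pat mp
        = fiwRef bs pat (bs.length - pat.length) mp 0 := by
      have h0 := A_eq_ref bs pat mp pat.length (bs.length - pat.length) rfl hw1 hn rfl
        bs.length 0 (-1) (by omega) (by omega) (by push_cast; omega)
      have hidx0 : 0 + 1 - pat.length = 0 := by omega
      rw [hidx0] at h0
      simpa [find_iter_window] using h0
    have hB : find_iter_window_alt bs pat mp
        = fiwRef bs pat (bs.length - pat.length) mp 0 := by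
      rw [find_iter_window_alt]
      simp only []
      rw [if_neg hw0, if_neg (by omega : ¬ bs.length < pat.length)]
      have hph : pat.foldl (fun h s => PySem.Int.mod (h * pvBase + ehash s) pvM) 0
          = hmod (pat.map ehash) := by
        rw [hmod, List.foldl_map]
      have hh0 : ((bs.map ehash).take pat.length).foldl
            (fun h e => PySem.Int.mod (h * pvBase + e) pvM) 0
          = hmod (((bs.drop 0).take pat.length).map ehash) := by
        rw [hmod, List.drop_zero, List.map_take]
      rw [hph, hh0]
      exact B_eq_ref bs pat mp pat.length (bs.length - pat.length) rfl hw1 hn rfl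
        (bs.length - pat.length) 0 _ (by omega) (by omega) rfl
    rw [hA, hB]
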